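-- pv_equiv track=rewrite | github.com/jk-jung/problem-solving | codewars/6kyu/6_Best Parking Spot.py | best_parking_spot
-- ===== SOURCE A (Python) =====
-- def best_parking_spot(v):
--     r = 0
--     def f(i):
--         if v[i] != 'OPEN': return 1 << 30
--         t = 1 << 30
--         for j, x in enumerate(v):
--             if x == 'CORRAL':
--                 t = min(t, abs(j - i))
--         return i * 2 + t * 2
--
--     for i in range(len(v)):
--         if f(r) >= f(i):
--             r = i
--     return r
-- ===== SOURCE B (Python) =====
-- def best_parking_spot(v):
--     INF = 1 << 30
--
--     def step(d, cell):
--         if cell == 'CORRAL':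
--             return 0
--         return d + 1 if d < INF else d
--
--     left = []
--     d = INF
--     for cell in v:
--         d = step(d, cell)
--         left.append(d)
--
--     right = []
--     d = INF
--     for cell in reversed(v):
--         d = step(d, cell)
--         right.append(d)
--     right.reverse()
--
--     best, best_score = 0, None
--     for i, cell in enumerate(v):
--         score = INF if cell != 'OPEN' else 2 * i + 2 * min(left[i], right[i])
--         if best_score is None or score <= best_score:
--             best, best_score = i, score
--     return best
-- ===== Notes on version B (the rewrite author's own statement) =====
-- stated objective: alternative
-- what changed: Replaces the per-OPEN-spot full rescan for the nearest CORRAL by a two-pass (left/right) nearest-corral distance precomputation plus a single last-argmin fold that caches the best score instead of re-evaluating it.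
import Mathlib
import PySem

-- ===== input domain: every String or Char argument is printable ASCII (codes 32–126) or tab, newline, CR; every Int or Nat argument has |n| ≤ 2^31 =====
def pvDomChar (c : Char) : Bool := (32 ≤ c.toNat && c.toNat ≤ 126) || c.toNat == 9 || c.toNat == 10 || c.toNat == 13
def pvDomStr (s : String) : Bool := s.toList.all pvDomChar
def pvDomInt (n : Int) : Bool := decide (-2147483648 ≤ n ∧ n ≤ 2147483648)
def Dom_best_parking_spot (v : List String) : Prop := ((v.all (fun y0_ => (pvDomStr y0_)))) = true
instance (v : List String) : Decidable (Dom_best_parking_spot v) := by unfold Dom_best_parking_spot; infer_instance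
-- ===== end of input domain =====

-- B replaces A's per-OPEN-spot full rescan for the nearest CORRAL by a two-pass
-- (left/right) nearest-corral distance precomputation plus a single cached-score
-- last-argmin fold (objective: alternative algorithm, same result).

-- ===== PORT A =====
def pvInf : Int := 1 <<< 30

-- A's inner function f(i); Python's v[i] is pyGet? (always in range at A's call sites,
-- where i comes from range(len(v)), so the `none` branch of the comparison never fires).
def pvA_f (v : List String) (i : Int) : Int :=
  if ¬ (PySem.List.pyGet? v i = some "OPEN") then pvInf
  else
    let t := (PySem.List.enumerate v).foldl
      (fun t p => if p.2 = "CORRAL" then min t |p.1 - i| else t) pvInf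
    i * 2 + t * 2

def best_parking_spot (v : List String) : Int :=
  (PySem.List.pyRange 0 v.length 1).foldl
    (fun r i => if pvA_f v r ≥ pvA_f v i then i else r) 0

-- ===== PORT B =====
-- Source B's step(d, cell)
def pvStep (d : Int) (cell : String) : Int :=
  if cell = "CORRAL" then 0 else if d < pvInf then d + 1 else d

-- Source B's "for cell in …: d = step(d, cell); out.append(d)" loop
def pvScan (d : Int) : List String → List Int
  | [] => []
  | c :: cs => (pvStep d c) :: pvScan (pvStep d c) cs

def best_parking_spot_alt (v : List String) : Int :=
  let left := pvScan pvInf v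
  let right := (pvScan pvInf v.reverse).reverse
  -- the last-argmin loop, carrying (best, best_score) with best_score = None initially
  ((PySem.List.enumerate v).foldl
    (fun (st : Int × Option Int) p =>
      let score := if p.2 ≠ "OPEN" then pvInf
                   else 2 * p.1 + 2 * min (PySem.List.pyGetD left p.1 0) (PySem.List.pyGetD right p.1 0)
      match st.2 with
      | none => (p.1, some score)
      | some bs => if score ≤ bs then (p.1, some score) else st)
    (0, none)).1

-- ===== PRECONDITION & SPEC =====
def Spec_best_parking_spot (v : List String) (out : Int) : Prop := out = best_parking_spot_alt v
instance (v : List String) (out : Int) : Decidable (Spec_best_parking_spot v out) := by unfold Spec_best_parking_spot; infer_instance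

-- ===== CLAIM (what is proved, stated in full; the proofs are below) =====
def Claim_equal_best_parking_spot : Prop := ∀ (v : List String), Dom_best_parking_spot v → Spec_best_parking_spot v (best_parking_spot v)

-- ===== LEMMAS AND PROOFS =====

-- corral positions of a list (0-based offsets, as Int)
def pvCorrals : List String → List Int
  | [] => []
  | x :: xs => (if x = "CORRAL" then [(0:Int)] else []) ++ (pvCorrals xs).map (fun j => j + 1)

-- min-fold algebra
theorem pvM1 (l : List Int) (a b : Int) :
    l.foldl min (min a b) = min a (l.foldl min b) := by
  induction l generalizing b with
  | nil => simp
  | cons x l ih =>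
      simp only [List.foldl_cons]
      rw [min_assoc, ih]

theorem pvM2 (l : List Int) (a : Int) : l.foldl min a ≤ a := by
  have h := pvM1 l a a
  rw [min_self] at h
  rw [h]; exact min_le_left _ _

theorem pvM3 (l : List Int) (a : Int) (ha : 0 ≤ a) (hl : ∀ x ∈ l, 0 ≤ x) :
    0 ≤ l.foldl min a := by
  induction l generalizing a with
  | nil => simpa
  | cons x l ih =>
      simp only [List.foldl_cons]
      exact ih _ (le_min ha (hl x (by simp))) (fun y hy => hl y (by simp [hy]))

theorem pvM4 (l : List Int) (a : Int) :
    (l.map (fun x => x + 1)).foldl min (min (a + 1) pvInf) = min (l.foldl min a + 1) pvInf := by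
  induction l generalizing a with
  | nil => simp
  | cons x l ih =>
      simp only [List.map_cons, List.foldl_cons]
      have h : min (min (a + 1) pvInf) (x + 1) = min (min a x + 1) pvInf := by
        omega
      rw [h, ih]

theorem pvM5 (l : List Int) (a : Int) : l.reverse.foldl min a = l.foldl min a := by
  induction l generalizing a with
  | nil => rfl
  | cons x l ih =>
      simp only [List.reverse_cons, List.foldl_append, List.foldl_cons, List.foldl_nil, ih]
      rw [min_comm a x, pvM1, min_comm]

-- corral-list structure
theorem pvCorrals_append (xs ys : List String) :
    pvCorrals (xs ++ ys) = pvCorrals xs ++ (pvCorrals ys).map (fun j => j + (xs.length : Int)) := by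
  induction xs with
  | nil => simp [pvCorrals]
  | cons x xs ih =>
      simp only [List.cons_append, pvCorrals, ih, List.map_append, List.map_map,
        List.append_assoc, List.length_cons]
      push_cast
      congr 2
      refine List.map_congr_left fun j _ => ?_
      simp only [Function.comp_apply]
      ring

theorem pvCorrals_mem (xs : List String) (j : Int) (h : j ∈ pvCorrals xs) :
    0 ≤ j ∧ j < xs.length := by
  induction xs generalizing j with
  | nil => simp [pvCorrals] at h
  | cons x xs ih =>
      simp only [pvCorrals, List.mem_append, List.mem_map] at h
      rcases h with h | ⟨k, hk, rfl⟩
      · split at h <;> simp_all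
      · have := ih k hk
        simp only [List.length_cons]
        push_cast
        omega

theorem pvCorrals_reverse (xs : List String) :
    pvCorrals xs.reverse = ((pvCorrals xs).map (fun j => (xs.length : Int) - 1 - j)).reverse := by
  induction xs with
  | nil => simp [pvCorrals]
  | cons x xs ih =>
      rw [List.reverse_cons, pvCorrals_append, ih]
      simp only [pvCorrals, List.map_append, List.map_map, List.reverse_append,
        List.length_cons, List.length_reverse]
      congr 1
      · congr 1
        refine (List.map_congr_left fun j _ => ?_).symm
        simp only [Function.comp_apply]
        push_cast
        ring
      · split
        · simp only [List.map_cons, List.map_nil, List.reverse_cons,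
            List.reverse_nil, List.nil_append, List.append_nil]
          push_cast
          norm_num
        · simp

-- scan lemmas
theorem pvScan_length (d : Int) (v : List String) : (pvScan d v).length = v.length := by
  induction v generalizing d with
  | nil => rfl
  | cons c cs ih => simp [pvScan, ih]

theorem pvScan_get (v : List String) (d : Int) (i : Nat) (h : i < v.length) :
    (pvScan d v)[i]'(by rw [pvScan_length]; exact h) = (v.take (i+1)).foldl pvStep d := by
  induction v generalizing d i with
  | nil => simp at h
  | cons c cs ih =>
      cases i with
      | zero => simp [pvScan, pvStep]
      | succ k => simpa [pvScan] using ih (pvStep d c) k (by simpa using h)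

-- the left pass computes the capped min over corral distances to the right end
theorem pvScan_core (xs : List String) :
    xs.foldl pvStep pvInf
      = ((pvCorrals xs).map (fun j => (xs.length : Int) - 1 - j)).foldl min pvInf := by
  induction xs using List.reverseRecOn with
  | nil => simp [pvCorrals]
  | append_singleton xs c ih =>
      rw [List.foldl_append, List.foldl_cons, List.foldl_nil, pvCorrals_append]
      by_cases hc : c = "CORRAL"
      · subst hc
        have hc1 : pvCorrals ["CORRAL"] = [0] := by simp [pvCorrals]
        rw [hc1]
        simp only [List.map_cons, List.map_nil, List.map_append, List.foldl_append,
          List.foldl_cons, List.foldl_nil]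
        have hstep : pvStep (List.foldl pvStep pvInf xs) "CORRAL" = 0 := by simp [pvStep]
        rw [hstep]
        have hge : 0 ≤ ((pvCorrals xs).map (fun j => (((xs ++ ["CORRAL"]).length : Nat) : Int) - 1 - j)).foldl min pvInf := by
          apply pvM3
          · simp [pvInf]
          · intro y hy
            simp only [List.mem_map] at hy
            obtain ⟨j, hj, rfl⟩ := hy
            have := pvCorrals_mem xs j hj
            simp only [List.length_append, List.length_cons, List.length_nil]
            push_cast
            omega
        simp only [List.length_append, List.length_cons, List.length_nil] at *
        push_cast at *
        omega
      · have hc1 : pvCorrals [c] = [] := by simp [pvCorrals, hc]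
        rw [hc1]
        simp only [List.map_nil, List.append_nil]
        have hD := pvM2 ((pvCorrals xs).map (fun j => (xs.length : Int) - 1 - j)) pvInf
        rw [← ih] at hD
        have hstep : pvStep (List.foldl pvStep pvInf xs) c = min (List.foldl pvStep pvInf xs + 1) pvInf := by
          simp only [pvStep, if_neg hc]
          split_ifs <;> omega
        rw [hstep, ih]
        have hmap : (pvCorrals xs).map (fun j => (((xs ++ [c]).length : Nat) : Int) - 1 - j)
            = ((pvCorrals xs).map (fun j => (xs.length : Int) - 1 - j)).map (fun x => x + 1) := by
          rw [List.map_map]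
          refine List.map_congr_left fun j _ => ?_
          simp only [Function.comp_apply, List.length_append, List.length_cons, List.length_nil]
          push_cast
          ring
        rw [hmap]
        have h4 := pvM4 ((pvCorrals xs).map (fun j => (xs.length : Int) - 1 - j)) pvInf
        rw [show min (pvInf + 1) pvInf = pvInf by omega] at h4
        rw [h4]

-- A's inner fold as a min-fold over corral distances (generalized start/accumulator)
theorem pvA_t_gen (xs : List String) (s a i : Int) :
    (PySem.List.enumerate xs s).foldl
      (fun t p => if p.2 = "CORRAL" then min t |p.1 - i| else t) a
      = ((pvCorrals xs).map (fun j => |j + s - i|)).foldl min a := by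
  induction xs generalizing s a with
  | nil => simp [pvCorrals, PySem.List.enumerate_nil]
  | cons x xs ih =>
      simp only [PySem.List.enumerate_cons, List.foldl_cons]
      rw [ih]
      have hcomp : ((pvCorrals xs).map (fun j => j + 1)).map (fun j => |j + s - i|)
          = (pvCorrals xs).map (fun j => |j + (s + 1) - i|) := by
        rw [List.map_map]
        refine List.map_congr_left fun j _ => ?_
        simp only [Function.comp_apply]
        congr 1
        ring
      by_cases hx : x = "CORRAL"
      · simp [pvCorrals, hx, hcomp]
      · simp only [pvCorrals, if_neg hx, List.nil_append, hcomp]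

-- A's t at index i (start 0)
theorem pvA_t (v : List String) (i : Int) :
    (PySem.List.enumerate v).foldl
      (fun t p => if p.2 = "CORRAL" then min t |p.1 - i| else t) pvInf
      = ((pvCorrals v).map (fun j => |j - i|)).foldl min pvInf := by
  have h := pvA_t_gen v 0 pvInf i
  simpa using h

theorem pvLeft (v : List String) (i : Nat) (h : i < v.length) :
    (pvScan pvInf v)[i]'(by rw [pvScan_length]; exact h)
      = ((pvCorrals (v.take (i+1))).map (fun j => (i:Int) - j)).foldl min pvInf := by
  rw [pvScan_get v pvInf i h, pvScan_core]
  have hl : (v.take (i+1)).length = i + 1 := by rw [List.length_take]; omega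
  rw [hl]
  congr 1
  refine List.map_congr_left fun j _ => ?_
  push_cast
  ring

theorem pvRight (v : List String) (i : Nat) (h : i < v.length) :
    ((pvScan pvInf v.reverse).reverse)[i]'(by
        rw [List.length_reverse, pvScan_length, List.length_reverse]; exact h)
      = (pvCorrals (v.drop i)).foldl min pvInf := by
  have hlen : (pvScan pvInf v.reverse).length = v.length := by
    rw [pvScan_length, List.length_reverse]
  rw [List.getElem_reverse]
  rw [pvScan_get v.reverse pvInf ((pvScan pvInf v.reverse).length - 1 - i)
        (by rw [hlen, List.length_reverse]; omega)]
  rw [hlen]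
  have htake : v.reverse.take (v.length - 1 - i + 1) = (v.drop i).reverse := by
    rw [List.take_reverse, show v.length - (v.length - 1 - i + 1) = i from by omega]
  rw [htake, pvScan_core, pvCorrals_reverse, List.map_reverse, pvM5, List.map_map]
  have hcomp : (pvCorrals (v.drop i)).map
      ((fun j => (((v.drop i).reverse.length : Nat) : Int) - 1 - j) ∘ (fun j => ((v.drop i).length : Int) - 1 - j))
      = pvCorrals (v.drop i) := by
    conv_rhs => rw [← List.map_id (pvCorrals (v.drop i))]
    refine List.map_congr_left fun j hj => ?_
    simp only [Function.comp_apply, List.length_reverse, id]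
    ring
  rw [hcomp]

theorem pvMsplit (l : List Int) (a : Int) (ha : a ≤ pvInf) :
    l.foldl min a = min a (l.foldl min pvInf) := by
  conv_lhs => rw [show a = min a pvInf from (min_eq_left ha).symm]
  rw [pvM1]

theorem pvDist_eq (v : List String) (i : Nat) (h : i < v.length) :
    min ((pvScan pvInf v)[i]'(by rw [pvScan_length]; exact h))
        (((pvScan pvInf v.reverse).reverse)[i]'(by
          rw [List.length_reverse, pvScan_length, List.length_reverse]; exact h))
      = ((pvCorrals v).map (fun j => |j - (i : Int)|)).foldl min pvInf := by
  rw [pvLeft v i h, pvRight v i h]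
  have hlen : (v.take i).length = i := by rw [List.length_take]; omega
  conv_rhs => rw [← List.take_append_drop i v]
  rw [pvCorrals_append, List.map_append, List.foldl_append]
  have hL2 : ((pvCorrals (v.drop i)).map (fun j => j + ((v.take i).length : Int))).map
      (fun j => |j - (i : Int)|) = pvCorrals (v.drop i) := by
    rw [List.map_map]
    conv_rhs => rw [← List.map_id (pvCorrals (v.drop i))]
    refine List.map_congr_left fun j hj => ?_
    have hm := pvCorrals_mem _ j hj
    simp only [Function.comp_apply, hlen, id]
    rw [show j + (i : Int) - (i : Int) = j from by ring]
    exact abs_of_nonneg hm.1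
  have hL1 : (pvCorrals (v.take i)).map (fun j => |j - (i : Int)|)
      = (pvCorrals (v.take i)).map (fun j => (i : Int) - j) := by
    refine List.map_congr_left fun j hj => ?_
    have hm := pvCorrals_mem _ j hj
    rw [hlen] at hm
    rw [abs_of_nonpos (by omega)]
    ring
  rw [hL1, hL2]
  rw [List.take_add_one, List.getElem?_eq_getElem h]
  simp only [Option.toList_some]
  rw [pvCorrals_append, List.map_append, List.foldl_append]
  by_cases hvi : v[i] = "CORRAL"
  · have hsing : pvCorrals [v[i]] = [0] := by simp [pvCorrals, hvi]
    rw [hsing]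
    have hm2 : (pvCorrals (v.drop i)).foldl min pvInf = 0 := by
      rw [List.drop_eq_getElem_cons h]
      simp only [pvCorrals, hvi, if_pos, List.singleton_append, List.foldl_cons]
      have ha : (0:Int) ≤ min pvInf 0 := by
        have : (0:Int) ≤ pvInf := by decide
        omega
      have h2 : 0 ≤ ((pvCorrals (v.drop (i+1))).map (fun j => j + 1)).foldl min (min pvInf 0) := by
        apply pvM3 _ _ ha
        intro y hy
        simp only [List.mem_map] at hy
        obtain ⟨j, hj, rfl⟩ := hy
        have := pvCorrals_mem _ j hj
        omega
      have h1 := pvM2 ((pvCorrals (v.drop (i+1))).map (fun j => j + 1)) (min pvInf 0)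
      omega
    rw [pvMsplit _ _ (pvM2 _ _), hm2]
    simp only [List.map_cons, List.map_nil, List.foldl_cons, List.foldl_nil, zero_add]
    rw [hlen]
    rw [show (i:Int) - (i:Int) = 0 from by ring]
    rw [pvMsplit (pvCorrals (v.drop i)) _ (pvM2 _ _), hm2]
    have h30 : (0:Int) ≤ pvInf := by decide
    omega
  · have hsing : pvCorrals [v[i]] = ([] : List Int) := by simp [pvCorrals, hvi]
    rw [hsing]
    simp only [List.map_nil, List.foldl_nil]
    rw [pvMsplit _ _ (pvM2 _ _)]

-- A's f at a valid index
theorem pvA_f_eq (v : List String) (i : Nat) (h : i < v.length) :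
    pvA_f v (i : Int)
      = if v[i] = "OPEN"
        then (i : Int) * 2 + (((pvCorrals v).map (fun j => |j - (i:Int)|)).foldl min pvInf) * 2
        else pvInf := by
  unfold pvA_f
  rw [pvA_t]
  have hg : PySem.List.pyGet? v (i : Int) = some v[i] := by
    rw [PySem.List.pyGet?_natCast, List.getElem?_eq_getElem h]
  rw [hg]
  by_cases ho : v[i] = "OPEN" <;> simp [ho]

-- the cached-score last-argmin fold tracks A's recomputing fold
theorem pvArgAux (f : Int → Int) (g : Int × String → Int) (l : List (Int × String)) (r : Int)
    (hl : ∀ p ∈ l, g p = f p.1) :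
    l.foldl (fun (st : Int × Option Int) p =>
        match st.2 with
        | none => (p.1, some (g p))
        | some bs => if g p ≤ bs then (p.1, some (g p)) else st) (r, some (f r))
      = (l.foldl (fun r p => if f r ≥ f p.1 then p.1 else r) r,
         some (f (l.foldl (fun r p => if f r ≥ f p.1 then p.1 else r) r))) := by
  induction l generalizing r with
  | nil => rfl
  | cons p l ih =>
      simp only [List.foldl_cons]
      rw [hl p (by simp)]
      by_cases hc : f p.1 ≤ f r
      · rw [if_pos hc, if_pos (ge_iff_le.mpr hc)]
        exact ih p.1 (fun q hq => hl q (by simp [hq]))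
      · rw [if_neg hc, if_neg (fun hge => hc (ge_iff_le.mp hge))]
        exact ih r (fun q hq => hl q (by simp [hq]))

-- B's per-spot score equals A's f at every enumerated index
theorem pvScore_eq (v : List String) (p : Int × String) (hp : p ∈ PySem.List.enumerate v 0) :
    (if p.2 ≠ "OPEN" then pvInf
     else 2 * p.1 + 2 * min (PySem.List.pyGetD (pvScan pvInf v) p.1 0)
                            (PySem.List.pyGetD ((pvScan pvInf v.reverse).reverse) p.1 0))
      = pvA_f v p.1 := by
  rw [PySem.List.mem_enumerate_iff] at hp
  obtain ⟨k, hk, rfl⟩ := hp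
  simp only [zero_add]
  rw [pvA_f_eq v k hk]
  rw [PySem.List.pyGetD_natCast, PySem.List.pyGetD_natCast]
  rw [List.getD_eq_getElem _ _ (by rw [pvScan_length]; exact hk),
      List.getD_eq_getElem _ _ (by
        rw [List.length_reverse, pvScan_length, List.length_reverse]; exact hk)]
  rw [pvDist_eq v k hk]
  by_cases ho : v[k] = "OPEN"
  · rw [if_neg (not_not_intro ho), if_pos ho]
    ring
  · rw [if_pos ho, if_neg ho]

theorem pvArgAux2 (f : Int → Int) (g : Int × String → Int) (l : List (Int × String)) (r : Int)
    (b0 : Int) (hb0 : b0 = f r) (hl : ∀ p ∈ l, g p = f p.1) :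
    (l.foldl (fun (st : Int × Option Int) p =>
        match st.2 with
        | none => (p.1, some (g p))
        | some bs => if g p ≤ bs then (p.1, some (g p)) else st) (r, some b0)).1
      = l.foldl (fun r p => if f r ≥ f p.1 then p.1 else r) r := by
  subst hb0
  rw [pvArgAux f g l r hl]

theorem best_parking_spot_spec : Claim_equal_best_parking_spot := by
  intro v _
  unfold Spec_best_parking_spot
  cases v with
  | nil => decide
  | cons c cs =>
      show best_parking_spot (c :: cs) = best_parking_spot_alt (c :: cs)
      have hA : PySem.List.pyRange 0 (((c :: cs).length : Nat) : Int) 1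
          = (PySem.List.enumerate (c :: cs) 0).map Prod.fst := by
        have h := PySem.List.map_fst_enumerate (c :: cs) 0
        simpa using h.symm
      have hAside : best_parking_spot (c :: cs)
          = List.foldl (fun r (p : Int × String) =>
              if pvA_f (c :: cs) r ≥ pvA_f (c :: cs) p.1 then p.1 else r) 0
              (PySem.List.enumerate (c :: cs) 0) := by
        unfold best_parking_spot
        rw [hA, List.foldl_map]
      rw [hAside, PySem.List.enumerate_cons, List.foldl_cons]
      rw [show (if pvA_f (c :: cs) 0 ≥ pvA_f (c :: cs) ((0:Int), c).1 then ((0:Int), c).1 else (0:Int))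
            = (0:Int) from by simp]
      have hg : ∀ p ∈ PySem.List.enumerate cs (0 + 1),
          (fun (p : Int × String) =>
            if p.2 ≠ "OPEN" then pvInf
            else 2 * p.1 + 2 * min (PySem.List.pyGetD (pvScan pvInf (c :: cs)) p.1 0)
                 (PySem.List.pyGetD ((pvScan pvInf (c :: cs).reverse).reverse) p.1 0)) p
            = pvA_f (c :: cs) p.1 := by
        intro p hp
        exact pvScore_eq (c :: cs) p (by
          rw [PySem.List.enumerate_cons]
          exact List.mem_cons_of_mem _ hp)
      have hb0 := pvScore_eq (c :: cs) ((0:Int), c) (by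
        rw [PySem.List.enumerate_cons]
        exact List.mem_cons_self)
      exact (pvArgAux2 (pvA_f (c :: cs))
        (fun (p : Int × String) =>
          if p.2 ≠ "OPEN" then pvInf
          else 2 * p.1 + 2 * min (PySem.List.pyGetD (pvScan pvInf (c :: cs)) p.1 0)
               (PySem.List.pyGetD ((pvScan pvInf (c :: cs).reverse).reverse) p.1 0))
        (PySem.List.enumerate cs (0 + 1)) 0 _ hb0 hg).symm
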